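-- pv_equiv track=rewrite | github.com/dgoldsb/advent-of-code-2019 | src/module/io.py | char_array
-- ===== SOURCE A (Python) =====
-- def char_array(string: str):
--     string = string
--     array = []
--     row = []
--
--     for char in string:
--         if char == "\n":
--             array.append(row)
--             row = []
--         else:
--             row.append(char)
--
--     if row:
--         array.append(row)
--
--     return array
-- ===== SOURCE B (Python) =====
-- def char_array(string: str):
--     parts = string.split("\n")
--     if parts and parts[-1] == "":
--         parts.pop()
--     return [list(p) for p in parts]
-- ===== Notes on version B (the rewrite author's own statement) =====
-- stated objective: idiomatic
-- what changed: B tokenizes the whole string with str.split("\n") and maps each line to its character list (dropping one trailing empty line), instead of A's char-by-char loop maintaining array/row accumulators.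
import Mathlib
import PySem

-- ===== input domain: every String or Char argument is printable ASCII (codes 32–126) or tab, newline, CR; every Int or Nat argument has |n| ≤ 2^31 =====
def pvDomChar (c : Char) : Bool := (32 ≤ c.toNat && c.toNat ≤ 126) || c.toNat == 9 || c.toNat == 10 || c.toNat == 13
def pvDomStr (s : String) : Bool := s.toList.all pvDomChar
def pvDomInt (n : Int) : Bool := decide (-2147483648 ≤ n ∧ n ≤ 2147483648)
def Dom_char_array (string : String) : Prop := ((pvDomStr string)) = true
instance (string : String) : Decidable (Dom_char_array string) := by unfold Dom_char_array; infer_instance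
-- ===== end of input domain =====

-- B replaces A's char-by-char accumulator loop with split("\n") followed by a per-line map (idiomatic; same cost).

-- ===== PORT A =====
-- char-by-char loop with (array, row) accumulators; final 'if row: array.append(row)'
def char_array (string : String) : List (List String) :=
  let st := string.toList.foldl
    (fun (st : List (List String) × List String) c =>
      if c = '\n' then (st.1 ++ [st.2], []) else (st.1, st.2 ++ [String.ofList [c]]))
    ([], [])
  if st.2 = [] then st.1 else st.1 ++ [st.2]

-- ===== PORT B =====
-- 'if parts and parts[-1] == "": parts.pop()' — drop the single trailing empty line
def pvPop (parts : List String) : List String :=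
  if parts.getLast? = some "" then parts.dropLast else parts

-- parts = string.split("\n") (PySem.Chars.splitOn is the sep ≠ "" form of str.split),
-- then pop a trailing empty line, then [list(p) for p in parts]
def char_array_alt (string : String) : List (List String) :=
  (pvPop ((PySem.Chars.splitOn string.toList "\n".toList).map String.ofList)).map
    (fun p => p.toList.map (fun c => String.ofList [c]))

-- ===== PRECONDITION & SPEC =====
def Spec_char_array (string : String) (out : List (List String)) : Prop := out = char_array_alt string
instance (string : String) (out : List (List String)) : Decidable (Spec_char_array string out) := by unfold Spec_char_array; infer_instance

-- ===== CLAIM (what is proved, stated in full; the proofs are below) =====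
def Claim_equal_char_array : Prop := ∀ (string : String), Dom_char_array string → Spec_char_array string (char_array string)

-- ===== LEMMAS AND PROOFS =====

-- structural split-on-'\n' (keeps a trailing empty piece), the common reference point
def pvSp : List Char → List (List Char)
  | [] => [[]]
  | c :: rest => if c = '\n' then [] :: pvSp rest else (c :: (pvSp rest).headI) :: (pvSp rest).tail

theorem pvSp_ne_nil (l : List Char) : pvSp l ≠ [] := by
  cases l with
  | nil => simp [pvSp]
  | cons c rest => simp only [pvSp]; split <;> simp

-- drop a single trailing empty row (String-row level)
def pvDT (rs : List (List String)) : List (List String) :=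
  if rs.getLast? = some [] then rs.dropLast else rs

theorem pvDT_cons (x : List String) (rs : List (List String)) (h : rs ≠ []) :
    pvDT (x :: rs) = x :: pvDT rs := by
  cases rs with
  | nil => exact absurd rfl h
  | cons y ys =>
    unfold pvDT
    rw [List.getLast?_cons_cons]
    split <;> simp

def pvRowStr (cs : List Char) : List String := cs.map (fun c => String.ofList [c])

-- the common reference value both ports are reduced to
def pvRef (s : String) : List (List String) := pvDT ((pvSp s.toList).map pvRowStr)

-- B's splitOn reduces to pvSp
theorem pv_go_eq (fuel : Nat) : ∀ (l cur : List Char) (acc : List (List Char)),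
    l.length < fuel →
    PySem.Chars.splitOn.go ['\n'] fuel l cur acc
      = acc.reverse ++ (pvSp l).modifyHead (fun x => cur.reverse ++ x) := by
  induction fuel with
  | zero => intro l cur acc h; omega
  | succ n ih =>
    intro l cur acc h
    cases l with
    | nil => simp [PySem.Chars.splitOn.go, pvSp]
    | cons c rest =>
      rw [PySem.Chars.splitOn.go]
      by_cases hc : c = '\n'
      · subst hc
        have hpre : List.isPrefixOf ['\n'] ('\n' :: rest) = true := by
          simp [List.isPrefixOf]
        rw [if_pos hpre, show List.drop ['\n'].length ('\n' :: rest) = rest from rfl,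
          ih rest [] (cur.reverse :: acc) (by simp at h; omega)]
        cases hsp : pvSp rest with
        | nil => exact absurd hsp (pvSp_ne_nil rest)
        | cons y ys => simp [pvSp, hsp, List.modifyHead]
      · have hpre : List.isPrefixOf ['\n'] (c :: rest) = false := by
          simp only [List.isPrefixOf, Bool.and_eq_false_iff, beq_eq_false_iff_ne, ne_eq]
          exact Or.inl fun hx => hc hx.symm
        rw [if_neg (by simp [hpre]), ih rest (c :: cur) acc (by simp at h ⊢; omega)]
        have hne := pvSp_ne_nil rest
        cases hsp : pvSp rest with
        | nil => exact absurd hsp hne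
        | cons y ys => simp [pvSp, hc, hsp, List.modifyHead]

theorem pv_splitOn_eq (l : List Char) :
    PySem.Chars.splitOn l ['\n'] = pvSp l := by
  rw [PySem.Chars.splitOn, pv_go_eq (l.length + 1) l [] [] (by omega)]
  cases h : pvSp l with
  | nil => exact absurd h (pvSp_ne_nil l)
  | cons y ys => simp [List.modifyHead]

-- A's loop step and finisher, named so the fold lemma rewrites cleanly
def pvStep (st : List (List String) × List String) (c : Char) : List (List String) × List String :=
  if c = '\n' then (st.1 ++ [st.2], []) else (st.1, st.2 ++ [String.ofList [c]])

def pvFin (st : List (List String) × List String) : List (List String) :=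
  if st.2 = [] then st.1 else st.1 ++ [st.2]

theorem pv_char_array_eq_fin (s : String) :
    char_array s = pvFin (s.toList.foldl pvStep ([], [])) := rfl

-- A's loop reduces to pvSp (with the trailing-empty-row drop folded in)
theorem pv_foldA (l : List Char) : ∀ (array : List (List String)) (row : List String),
    pvFin (l.foldl pvStep (array, row))
      = array ++ pvDT (((pvSp l).map pvRowStr).modifyHead (fun x => row ++ x)) := by
  induction l with
  | nil =>
    intro array row
    simp only [List.foldl_nil, pvFin, pvSp, List.map_cons, List.map_nil, pvRowStr,
      List.modifyHead, pvDT]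
    by_cases h : row = [] <;> simp [h]
  | cons c rest ih =>
    intro array row
    by_cases hc : c = '\n'
    · subst hc
      have hstep : pvStep (array, row) '\n' = (array ++ [row], []) := by simp [pvStep]
      rw [List.foldl_cons, hstep, ih (array ++ [row]) []]
      have hne : (pvSp rest).map pvRowStr ≠ [] := by simp [pvSp_ne_nil rest]
      cases hm : (pvSp rest).map pvRowStr with
      | nil => exact absurd hm hne
      | cons y ys =>
        have hL : pvSp ('\n' :: rest) = [] :: pvSp rest := by simp [pvSp]
        rw [hL]
        simp only [List.map_cons, hm, show pvRowStr [] = [] from rfl, List.modifyHead,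
          List.nil_append, List.append_nil]
        rw [pvDT_cons row (y :: ys) (by simp)]
        simp
    · have hstep : pvStep (array, row) c = (array, row ++ [String.ofList [c]]) := by
        simp [pvStep, hc]
      rw [List.foldl_cons, hstep, ih array (row ++ [String.ofList [c]])]
      have hne := pvSp_ne_nil rest
      cases hsp : pvSp rest with
      | nil => exact absurd hsp hne
      | cons y ys =>
        simp [pvSp, hc, hsp, List.modifyHead, pvRowStr]

theorem pv_char_array_eq (s : String) : char_array s = pvRef s := by
  rw [pv_char_array_eq_fin, pv_foldA s.toList [] [], pvRef]
  cases h : (pvSp s.toList).map pvRowStr with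
  | nil => exact absurd h (by simp [pvSp_ne_nil])
  | cons y ys => simp [List.modifyHead]

theorem pv_map_map (M : List (List Char)) :
    (M.map String.ofList).map (fun p => p.toList.map (fun c => String.ofList [c]))
      = M.map pvRowStr := by
  rw [List.map_map]
  refine List.map_congr_left fun cs _ => ?_
  simp [pvRowStr]

theorem pv_getLast?_map_ofList (xs : List (List Char)) :
    ((xs.map String.ofList).getLast? = some "") ↔ (xs.getLast? = some []) := by
  rw [List.getLast?_map]
  cases h : xs.getLast? with
  | none => simp
  | some y => simp

theorem pv_char_array_alt_eq (s : String) : char_array_alt s = pvRef s := by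
  unfold char_array_alt pvPop pvRef pvDT
  rw [show ("\n" : String).toList = ['\n'] from rfl, pv_splitOn_eq]
  by_cases h : (pvSp s.toList).getLast? = some []
  · have h2 : ((pvSp s.toList).map pvRowStr).getLast? = some [] := by
      rw [List.getLast?_map, h]; rfl
    rw [if_pos ((pv_getLast?_map_ofList _).mpr h), if_pos h2, ← List.map_dropLast, pv_map_map,
      List.map_dropLast]
  · have h2 : ¬ ((pvSp s.toList).map pvRowStr).getLast? = some [] := by
      rw [List.getLast?_map]
      cases hx : (pvSp s.toList).getLast? with
      | none => simp
      | some y =>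
        simp only [Option.map_some, Option.some.injEq]
        intro hc
        exact h (by rw [hx, show y = [] from by simpa [pvRowStr] using hc])
    rw [if_neg (fun hx => h ((pv_getLast?_map_ofList _).mp hx)), if_neg h2, pv_map_map]

-- ===== VERDICT (by name: the statement is the Claim_ definition above) =====
theorem char_array_spec : Claim_equal_char_array := by
  intro s _
  unfold Spec_char_array
  rw [pv_char_array_eq, pv_char_array_alt_eq]
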